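-- pv_equiv track=rewrite | github.com/algbio/panvc-sample-workflow | pvc_py_tools/filter_sam_by_edit_distance.py | find_optional_start
-- ===== SOURCE A (Python) =====
-- def find_optional_start(line):
-- 	"""Find the starting position of the optional fields on the given line."""
-- 	pos = 0
-- 	for i in range(0, 11):
-- 		pos = line.find("\t", pos)
-- 		if -1 == pos:
-- 			return -1
-- 		pos += 1
-- 	return pos
-- ===== SOURCE B (Python) =====
-- def find_optional_start(line):
-- 	"""Find the starting position of the optional fields on the given line."""
-- 	parts = line.split("\t", 11)
-- 	if len(parts) < 12:
-- 		return -1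
-- 	return len(line) - len(parts[11])
-- ===== Notes on version B (the rewrite author's own statement) =====
-- stated objective: simpler
-- what changed: Replaced the eleven-iteration find loop with a single tab-split capped at 11 splits: fewer than 12 parts means fewer than 11 tabs (return -1), otherwise the offset of the 12th part is len(line) minus len(parts[11]).
import Mathlib
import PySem

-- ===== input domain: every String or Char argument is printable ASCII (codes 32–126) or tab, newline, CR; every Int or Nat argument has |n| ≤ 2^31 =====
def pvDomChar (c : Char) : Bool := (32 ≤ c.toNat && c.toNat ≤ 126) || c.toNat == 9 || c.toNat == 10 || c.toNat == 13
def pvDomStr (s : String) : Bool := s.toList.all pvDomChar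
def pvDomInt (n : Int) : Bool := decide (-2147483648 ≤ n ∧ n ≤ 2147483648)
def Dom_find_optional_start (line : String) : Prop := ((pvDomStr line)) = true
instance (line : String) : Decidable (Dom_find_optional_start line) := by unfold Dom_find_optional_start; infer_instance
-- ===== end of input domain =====

-- B replaces A's eleven-iteration find loop by a single split capped at 11 plus length arithmetic (simpler; same O(n) cost).


-- ===== PORT A =====
-- for i in range(0, 11): pos = line.find("\t", pos); if -1 == pos: return -1; pos += 1
def fos_loop (line : String) : Nat → Int → Int
  | 0, pos => pos
  | n+1, pos =>
      let p := PySem.Str.findFrom line "\t" pos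
      if p = -1 then -1 else fos_loop line n (p + 1)

def find_optional_start (line : String) : Int := fos_loop line 11 0

-- ===== PORT B =====
-- parts = line.split("\t", 11); if len(parts) < 12: return -1; return len(line) - len(parts[11])
def find_optional_start_alt (line : String) : Int :=
  let parts := PySem.Chars.splitOnMax line.toList ['\t'] 11
  if parts.length < 12 then -1
  else (line.toList.length : Int) - ((PySem.List.pyGetD parts 11 []).length : Int)

-- ===== PRECONDITION & SPEC =====
def Spec_find_optional_start (line : String) (out : Int) : Prop := out = find_optional_start_alt line
instance (line : String) (out : Int) : Decidable (Spec_find_optional_start line out) := by unfold Spec_find_optional_start; infer_instance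

-- ===== CLAIM (what is proved, stated in full; the proofs are below) =====
def Claim_equal_find_optional_start : Prop := ∀ (line : String), Dom_find_optional_start line → Spec_find_optional_start line (find_optional_start line)

-- ===== LEMMAS AND PROOFS =====

-- A's loop expressed on the character-list suffix (proof-side only).
def aRec : Nat → List Char → Int → Int
  | 0, _, k => k
  | n+1, cs, k =>
      let f := PySem.Chars.find cs ['\t']
      if f = -1 then -1 else aRec n (cs.drop (f.toNat+1)) (k + f + 1)

-- one structural left-to-right scan: position after the n-th tab, or -1
def scanTab : List Char → Nat → Int → Int
  | [], _, _ => -1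
  | c :: r, n, k => if c = '\t' then (if n = 1 then k+1 else scanTab r (n-1) (k+1)) else scanTab r n (k+1)

-- structural recursion computing split("\t", m) (proof-side model of splitOnMax)
def split11 : List Char → Nat → List (List Char)
  | [], _ => [[]]
  | c :: r, 0 => [c :: r]
  | c :: r, m+1 => if c = '\t' then [] :: split11 r m else (split11 r (m+1)).modifyHead (c :: ·)

lemma splitGo_nil (fuel m : Nat) (cur : List Char) (acc : List (List Char)) :
    PySem.Chars.splitOnMax.go ['\t'] (fuel+1) m [] cur acc = acc.reverse ++ [cur.reverse] := by
  simp [PySem.Chars.splitOnMax.go]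

lemma splitGo_cons (fuel m : Nat) (c : Char) (rest cur : List Char) (acc : List (List Char)) :
    PySem.Chars.splitOnMax.go ['\t'] (fuel+1) m (c :: rest) cur acc =
      if m = 0 then acc.reverse ++ [cur.reverse ++ (c :: rest)]
      else if c = '\t' then PySem.Chars.splitOnMax.go ['\t'] fuel (m-1) rest [] (cur.reverse :: acc)
      else PySem.Chars.splitOnMax.go ['\t'] fuel m rest (c :: cur) acc := by
  rw [PySem.Chars.splitOnMax.go.eq_3]
  by_cases hm : m = 0
  · simp [hm]
  · by_cases hc : c = '\t'
    · simp [hm, hc, List.isPrefixOf]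
    · simp [hm, hc, List.isPrefixOf]
      intro h
      exact absurd h.symm hc

lemma split11_ne_nil (cs : List Char) (m : Nat) : split11 cs m ≠ [] := by
  induction cs generalizing m with
  | nil => simp [split11]
  | cons c r ih =>
    cases m with
    | zero => simp [split11]
    | succ m =>
      simp only [split11]
      split_ifs
      · simp
      · intro h
        have h2 := congrArg List.length h
        simp at h2
        exact (ih (m+1)) h2

lemma modifyHead_id' (l : List (List Char)) : l.modifyHead (fun x => x) = l := by
  cases l <;> simp

lemma modifyHead_comp_tab (c : Char) (cur : List Char) (l : List (List Char)) :
    l.modifyHead (fun x => cur.reverse ++ (c :: x))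
      = (l.modifyHead (c :: ·)).modifyHead (cur.reverse ++ ·) := by
  cases l <;> simp

lemma go_split11 (cs : List Char) (fuel m : Nat) (cur : List Char) (acc : List (List Char))
    (h : cs.length < fuel) :
    PySem.Chars.splitOnMax.go ['\t'] fuel m cs cur acc
      = acc.reverse ++ (split11 cs m).modifyHead (cur.reverse ++ ·) := by
  induction cs generalizing fuel m cur acc with
  | nil =>
    cases fuel with
    | zero => omega
    | succ f => rw [splitGo_nil]; simp [split11]
  | cons c r ih =>
    cases fuel with
    | zero => omega
    | succ f =>
      rw [splitGo_cons]
      cases m with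
      | zero => simp [split11]
      | succ m =>
        by_cases hc : c = '\t'
        · simp only [hc, Nat.succ_ne_zero, if_false, if_true, Nat.add_sub_cancel]
          rw [ih f m [] (cur.reverse :: acc) (by simp at h; omega)]
          simp [split11, modifyHead_id']
        · simp only [Nat.succ_ne_zero, if_false, hc]
          rw [ih f (m+1) (c :: cur) acc (by simp at h; omega)]
          simp only [split11, hc, if_false]
          have hfun : (fun x => (c :: cur).reverse ++ x) = (fun x : List Char => cur.reverse ++ (c :: x)) := by
            funext x; simp
          rw [congrArg (fun g => acc.reverse ++ (split11 r (m+1)).modifyHead g) hfun]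
          rw [modifyHead_comp_tab]

lemma splitOnMax_eq_split11 (cs : List Char) :
    PySem.Chars.splitOnMax cs ['\t'] 11 = split11 cs 11 := by
  have h11 : ¬ ((11 : Int) < 0) := by norm_num
  simp only [PySem.Chars.splitOnMax, h11, if_false]
  have ht : (11 : Int).toNat = 11 := rfl
  rw [ht, go_split11 cs (cs.length + 1) 11 [] [] (by omega)]
  have hfun : (fun x => ([] : List Char).reverse ++ x) = (fun x : List Char => x) := by
    funext x; simp
  rw [congrArg (fun g => (split11 cs 11).modifyHead g) hfun, modifyHead_id']
  simp

lemma findGo_nil (k : Nat) : PySem.Chars.find.go ['\t'] [] k = -1 := by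
  simp [PySem.Chars.find.go]

lemma findGo_cons (c : Char) (rest : List Char) (k : Nat) :
    PySem.Chars.find.go ['\t'] (c :: rest) k = if c = '\t' then (k : Int) else PySem.Chars.find.go ['\t'] rest (k+1) := by
  rw [PySem.Chars.find.go.eq_2]
  by_cases hc : c = '\t'
  · simp [hc, List.isPrefixOf]
  · simp [hc, List.isPrefixOf]
    intro h
    exact absurd h.symm hc

lemma findGo_shift (s : List Char) (k : Nat) :
    PySem.Chars.find.go ['\t'] s (k+1)
      = if PySem.Chars.find.go ['\t'] s k = -1 then -1 else PySem.Chars.find.go ['\t'] s k + 1 := by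
  induction s generalizing k with
  | nil => simp [findGo_nil]
  | cons c r ih =>
    rw [findGo_cons, findGo_cons]
    by_cases hc : c = '\t'
    · simp [hc]
    · simp only [hc, if_false]
      rw [ih (k+1)]

lemma find_tab_cons (c : Char) (rest : List Char) :
    PySem.Chars.find (c :: rest) ['\t']
      = if c = '\t' then 0
        else if PySem.Chars.find rest ['\t'] = -1 then -1 else PySem.Chars.find rest ['\t'] + 1 := by
  simp only [PySem.Chars.find]
  rw [findGo_cons]
  by_cases hc : c = '\t'
  · simp [hc]
  · simp only [hc, if_false]
    have hs := findGo_shift rest 0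
    norm_num at hs
    rw [hs]

lemma find_tab_nil : PySem.Chars.find ([] : List Char) ['\t'] = -1 := by
  simp [PySem.Chars.find, findGo_nil]

lemma aRec_eq_scanTab (cs : List Char) (n : Nat) (k : Int) :
    aRec (n+1) cs k = scanTab cs (n+1) k := by
  induction cs generalizing n k with
  | nil => simp [aRec, scanTab, find_tab_nil]
  | cons c r ih =>
    by_cases hc : c = '\t'
    · have hf : PySem.Chars.find (c :: r) ['\t'] = 0 := by rw [find_tab_cons]; simp [hc]
      have h0 : ((0:Int) = -1) = False := by simp
      simp only [aRec, hf, h0, if_false, Int.toNat_zero, zero_add, List.drop_succ_cons,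
        List.drop_zero, add_zero]
      cases n with
      | zero => simp [scanTab, hc, aRec]
      | succ m =>
        rw [ih m (k+1)]
        simp [scanTab, hc]
    · by_cases hfr : PySem.Chars.find r ['\t'] = -1
      · have hf : PySem.Chars.find (c :: r) ['\t'] = -1 := by rw [find_tab_cons]; simp [hc, hfr]
        have hscan : scanTab r (n+1) (k+1) = -1 := by
          rw [← ih n (k+1)]
          simp [aRec, hfr]
        simp [aRec, hf, scanTab, hc, hscan]
      · have hfr0 : (0:Int) ≤ PySem.Chars.find r ['\t'] := by
          have := PySem.Chars.neg_one_le_find r ['\t']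
          omega
        have hf : PySem.Chars.find (c :: r) ['\t'] = PySem.Chars.find r ['\t'] + 1 := by
          rw [find_tab_cons, if_neg hc, if_neg hfr]
        have hne : PySem.Chars.find r ['\t'] + 1 ≠ -1 := by omega
        have htn : (PySem.Chars.find r ['\t'] + 1).toNat = (PySem.Chars.find r ['\t']).toNat + 1 := by
          omega
        simp only [aRec, hf, hne, if_false, htn, List.drop_succ_cons]
        simp only [scanTab, hc, if_false]
        rw [← ih n (k+1)]
        simp only [aRec, hfr, if_false]
        congr 1
        ring

lemma split11_zero (cs : List Char) : split11 cs 0 = [cs] := by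
  cases cs <;> simp [split11]

lemma split11_spec (cs : List Char) (n : Nat) (k : Int) (hk : 0 ≤ k) :
    (scanTab cs (n+1) k = -1 → (split11 cs (n+1)).length < n + 2)
    ∧ (scanTab cs (n+1) k ≠ -1 →
        (split11 cs (n+1)).length = n + 2
        ∧ (((split11 cs (n+1)).getD (n+1) []).length : Int) = (cs.length : Int) + k - scanTab cs (n+1) k) := by
  induction cs generalizing n k with
  | nil =>
    constructor
    · intro _; simp [split11]
    · intro h; simp [scanTab] at h
  | cons c r ih =>
    by_cases hc : c = '\t'
    · cases n with
      | zero =>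
        have hscan : scanTab (c :: r) 1 k = k + 1 := by simp [scanTab, hc]
        constructor
        · intro h; rw [hscan] at h; omega
        · intro _
          constructor
          · simp [split11, hc, split11_zero]
          · rw [hscan]
            simp only [split11, hc, if_true, split11_zero, List.getD_cons_succ, List.getD_cons_zero,
              List.length_cons]
            push_cast; ring
      | succ m =>
        have hstep : scanTab (c :: r) (m+1+1) k = scanTab r (m+1) (k+1) := by
          simp [scanTab, hc]
        constructor
        · intro h
          rw [hstep] at h
          have := (ih m (k+1) (by omega)).1 h
          simp only [split11, hc, if_true, List.length_cons]
          omega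
        · intro h
          rw [hstep] at h
          obtain ⟨h1, h2⟩ := (ih m (k+1) (by omega)).2 h
          refine ⟨by simp [split11, hc, h1], ?_⟩
          rw [hstep]
          simp only [split11, hc, if_true, List.getD_cons_succ, List.length_cons]
          rw [h2]
          push_cast; ring
    · have hstep : scanTab (c :: r) (n+1) k = scanTab r (n+1) (k+1) := by
        simp [scanTab, hc]
      have hlen : (split11 (c :: r) (n+1)).length = (split11 r (n+1)).length := by
        simp [split11, hc]
      constructor
      · intro h
        rw [hstep] at h
        have := (ih n (k+1) (by omega)).1 h
        omega
      · intro h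
        rw [hstep] at h
        obtain ⟨h1, h2⟩ := (ih n (k+1) (by omega)).2 h
        refine ⟨by omega, ?_⟩
        rw [hstep]
        have hget : (split11 (c :: r) (n+1)).getD (n+1) [] = (split11 r (n+1)).getD (n+1) [] := by
          simp only [split11, hc, if_false]
          cases hsp : split11 r (n+1) with
          | nil => exact absurd hsp (split11_ne_nil r (n+1))
          | cons p ps => simp [List.modifyHead]
        rw [hget, h2]
        simp only [List.length_cons]
        push_cast; ring

lemma fos_loop_eq_aRec (line : String) (n : Nat) (m : Nat) (hm : m ≤ line.toList.length) :
    fos_loop line n (m : Int) = aRec n (line.toList.drop m) (m : Int) := by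
  induction n generalizing m with
  | zero => simp [fos_loop, aRec]
  | succ n ih =>
    have hff : PySem.Str.findFrom line "\t" (m : Int)
        = PySem.Chars.findFrom line.toList ['\t'] (m : Int) := by
      have htl : ("\t" : String).toList = ['\t'] := rfl
      rw [← htl]; simp
    have hnat := PySem.Chars.findFrom_natCast line.toList ['\t'] m hm
    by_cases hfind : PySem.Chars.find (line.toList.drop m) ['\t'] = -1
    · have hp : PySem.Str.findFrom line "\t" (m : Int) = -1 := by
        rw [hff, hnat, if_pos hfind]
      simp only [fos_loop, hp, aRec, hfind]
      simp
    · have hf0 : (0:Int) ≤ PySem.Chars.find (line.toList.drop m) ['\t'] := by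
        have := PySem.Chars.neg_one_le_find (line.toList.drop m) ['\t']
        omega
      have hp : PySem.Str.findFrom line "\t" (m : Int)
          = (m:Int) + PySem.Chars.find (line.toList.drop m) ['\t'] := by
        rw [hff, hnat, if_neg hfind]
      have hflt : (PySem.Chars.find (line.toList.drop m) ['\t']).toNat < (line.toList.drop m).length := by
        have hpre := (PySem.Chars.find_spec (s := line.toList.drop m) (sub := ['\t']) hf0).1
        by_contra hge
        rw [not_lt] at hge
        rw [List.drop_eq_nil_of_le hge] at hpre
        simp at hpre
      have hle : m + (PySem.Chars.find (line.toList.drop m) ['\t']).toNat + 1 ≤ line.toList.length := by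
        rw [List.length_drop] at hflt
        omega
      have hpne : (m:Int) + PySem.Chars.find (line.toList.drop m) ['\t'] ≠ -1 := by
        have hm0 : (0:Int) ≤ (m:Int) := Int.natCast_nonneg m
        omega
      have hcast : (m : Int) + PySem.Chars.find (line.toList.drop m) ['\t'] + 1
          = ((m + (PySem.Chars.find (line.toList.drop m) ['\t']).toNat + 1 : Nat) : Int) := by
        push_cast [Int.toNat_of_nonneg hf0]
        ring
      simp only [fos_loop, hp, hpne, if_false]
      rw [hcast, ih _ hle]
      simp only [aRec, hfind, if_false]
      congr 1
      · rw [List.drop_drop, Nat.add_assoc]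
      · exact hcast.symm

-- ===== VERDICT (by name: the statement is the Claim_ definition above) =====
theorem find_optional_start_spec : Claim_equal_find_optional_start := by
  intro line _
  unfold Spec_find_optional_start find_optional_start find_optional_start_alt
  have h0 : (0 : Int) = ((0 : Nat) : Int) := rfl
  rw [h0, fos_loop_eq_aRec line 11 0 (by omega)]
  simp only [List.drop_zero, Nat.cast_zero]
  rw [show aRec 11 line.toList 0 = aRec (10+1) line.toList 0 from rfl,
      aRec_eq_scanTab line.toList 10 0]
  rw [splitOnMax_eq_split11]
  obtain ⟨hmiss, hhit⟩ := split11_spec line.toList 10 0 (by omega)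
  by_cases hs : scanTab line.toList (10+1) 0 = -1
  · have hlt := hmiss hs
    rw [hs, if_pos (by exact_mod_cast hlt)]
  · obtain ⟨h1, h2⟩ := hhit hs
    have hnl : ¬ ((split11 line.toList 11).length < 12) := by
      rw [show split11 line.toList 11 = split11 line.toList (10+1) from rfl, h1]
      omega
    rw [if_neg hnl]
    have hget : PySem.List.pyGetD (split11 line.toList 11) 11 ([] : List Char)
        = (split11 line.toList (10+1)).getD (10+1) [] := by
      rw [show (11:Int) = ((11:Nat) : Int) from rfl, PySem.List.pyGetD_natCast]
    rw [hget, h2]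
    ring
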